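-- pv_equiv track=rewrite | github.com/Yash7256/CyberSec-CLI | src/cybersec_cli/core/validators.py | validate_port_range
-- ===== SOURCE A (Python) =====
-- from typing import List, Optional
--
-- def validate_port_range(ports: List[int]) -> bool:
--     """
--     Validate a list of ports to ensure they're in a safe range.
--
--     Args:
--         ports: List of port numbers to validate
--
--     Returns:
--         True if all ports are valid, False otherwise
--     """
--     if not isinstance(ports, list):
--         return False
--
--     if len(ports) > 65536:  # Allow full port range
--         return False
--
--     seen = set()
--     for port in ports:
--         if not isinstance(port, int):
--             return False
--         if port < 1 or port > 65535:  # Port 0 is invalid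
--             return False
--         if port in seen:  # No duplicates
--             return False
--         seen.add(port)
--
--     return True
-- ===== SOURCE B (Python) =====
-- def validate_port_range(ports):
--     """Validate ports by sorting: endpoints give the range check, adjacent
--     strict increase gives duplicate-freeness."""
--     if not isinstance(ports, list):
--         return False
--     if len(ports) > 65536:
--         return False
--     if not all(isinstance(p, int) for p in ports):
--         return False
--     s = sorted(ports)
--     if not s:
--         return True
--     if s[0] < 1 or s[-1] > 65535:
--         return False
--     return all(a < b for a, b in zip(s, s[1:]))
-- ===== Notes on version B (the rewrite author's own statement) =====
-- stated objective: alternative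
-- what changed: B sorts the list once and replaces A's seen-set loop entirely: the range check becomes two endpoint comparisons on the sorted list (min and max) and duplicate detection becomes a strict-increase scan over adjacent sorted pairs; trades O(n) for O(n log n).
import Mathlib
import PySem

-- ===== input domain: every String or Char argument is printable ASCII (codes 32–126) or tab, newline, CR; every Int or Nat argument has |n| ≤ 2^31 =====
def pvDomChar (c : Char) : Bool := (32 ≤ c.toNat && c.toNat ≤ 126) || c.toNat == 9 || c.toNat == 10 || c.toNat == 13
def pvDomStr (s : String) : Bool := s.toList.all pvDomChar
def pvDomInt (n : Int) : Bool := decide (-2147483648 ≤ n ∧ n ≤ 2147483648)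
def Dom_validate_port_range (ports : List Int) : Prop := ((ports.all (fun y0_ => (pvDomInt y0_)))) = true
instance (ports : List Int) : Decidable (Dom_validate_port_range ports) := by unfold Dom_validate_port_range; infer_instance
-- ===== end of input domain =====

-- B sorts once and checks range via the two endpoints and duplicates via adjacent strict increase, replacing A's seen-set loop (objective: alternative).
-- The Python isinstance checks are vacuous on List Int and are not ported.

-- ===== PORT A =====
-- A's for-loop: early-returns on range violation or duplicate, threads the seen set
def pvLoopA : List Int → PySem.Set Int → Bool
  | [], _ => true
  | p :: rest, seen =>
    if p < 1 ∨ p > 65535 then false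
    else if PySem.Set.contains seen p then false
    else pvLoopA rest (PySem.Set.add seen p)

def validate_port_range (ports : List Int) : Bool :=
  if ports.length > 65536 then false
  else pvLoopA ports PySem.Set.empty

-- ===== PORT B =====
def validate_port_range_alt (ports : List Int) : Bool :=
  if ports.length > 65536 then false
  else
    match PySem.List.sorted ports (fun x => x) false with
    | [] => true                                   -- 'if not s: return True'
    | m :: t =>
      if m < 1 ∨ (m :: t).getLast (List.cons_ne_nil m t) > 65535 then false   -- s[0], s[-1]
      else ((m :: t).zip t).all (fun ab => decide (ab.1 < ab.2))              -- zip(s, s[1:])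

-- ===== PRECONDITION & SPEC =====
def Spec_validate_port_range (ports : List Int) (out : Bool) : Prop := out = validate_port_range_alt ports
instance (ports : List Int) (out : Bool) : Decidable (Spec_validate_port_range ports out) := by unfold Spec_validate_port_range; infer_instance

-- ===== CLAIM (what is proved, stated in full; the proofs are below) =====
def Claim_equal_validate_port_range : Prop := ∀ (ports : List Int), Dom_validate_port_range ports → Spec_validate_port_range ports (validate_port_range ports)

-- ===== LEMMAS AND PROOFS =====

-- A's loop succeeds iff all elements are in range, pairwise distinct, and fresh w.r.t. seen
theorem pv_loopA_iff (xs : List Int) (seen : PySem.Set Int) :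
    pvLoopA xs seen = true ↔
      (∀ p ∈ xs, 1 ≤ p ∧ p ≤ 65535) ∧ xs.Nodup ∧ (∀ p ∈ xs, p ∉ seen) := by
  induction xs generalizing seen with
  | nil => simp [pvLoopA]
  | cons p rest ih =>
    simp only [pvLoopA]
    by_cases hr : p < 1 ∨ p > 65535
    · rw [if_pos hr]
      refine iff_of_false (by simp) ?_
      rintro ⟨h1, -, -⟩
      have := h1 p (by simp)
      omega
    · rw [if_neg hr]
      by_cases hc : PySem.Set.contains seen p = true
      · rw [if_pos hc]
        have hmem : p ∈ seen := (PySem.Set.contains_iff seen p).mp hc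
        refine iff_of_false (by simp) ?_
        rintro ⟨-, -, h3⟩
        exact h3 p (by simp) hmem
      · rw [if_neg (by simpa using hc), ih]
        have hpm : p ∉ seen := fun h => hc ((PySem.Set.contains_iff seen p).mpr h)
        constructor
        · rintro ⟨h1, h2, h3⟩
          refine ⟨?_, ?_, ?_⟩
          · intro q hq
            rcases List.mem_cons.mp hq with rfl | hq
            · omega
            · exact h1 q hq
          · exact List.nodup_cons.mpr ⟨fun h => by
              have := h3 p h; rw [PySem.Set.mem_add] at this; simp at this, h2⟩
          · intro q hq
            rcases List.mem_cons.mp hq with rfl | hq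
            · exact hpm
            · intro hmem
              exact (h3 q hq) (by rw [PySem.Set.mem_add]; exact Or.inl hmem)
        · rintro ⟨h1, h2, h3⟩
          refine ⟨fun q hq => h1 q (by simp [hq]), (List.nodup_cons.mp h2).2, ?_⟩
          intro q hq hadd
          rw [PySem.Set.mem_add] at hadd
          rcases hadd with h | rfl
          · exact (h3 q (by simp [hq])) h
          · exact (List.nodup_cons.mp h2).1 hq

-- the zip-adjacent all() is Chain' (<)
theorem pv_zip_all_iff (m : Int) (t : List Int) :
    (((m :: t).zip t).all (fun ab => decide (ab.1 < ab.2)) = true) ↔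
      List.IsChain (· < ·) (m :: t) := by
  induction t generalizing m with
  | nil => simp
  | cons b t' ih =>
    simp only [List.zip_cons_cons, List.all_cons, Bool.and_eq_true, decide_eq_true_eq,
      List.isChain_cons_cons]
    exact and_congr Iff.rfl (ih b)

-- in a ≤-sorted list every element is ≤ the last
theorem pv_le_getLast (l : List Int) (hl : l.Pairwise (· ≤ ·)) (h : l ≠ []) :
    ∀ x ∈ l, x ≤ l.getLast h := by
  induction l with
  | nil => simp
  | cons a l ih =>
    intro x hx
    cases l with
    | nil => simp at hx; simp [hx]
    | cons b l' =>
      rw [List.getLast_cons (by simp)]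
      rcases List.mem_cons.mp hx with rfl | hx
      · calc x ≤ b := (List.pairwise_cons.mp hl).1 b (by simp)
          _ ≤ (b :: l').getLast (by simp) :=
            ih (List.pairwise_cons.mp hl).2 (by simp) b (by simp)
      · exact ih (List.pairwise_cons.mp hl).2 (by simp) x hx

-- ===== VERDICT (by name: the statement is the Claim_ definition above) =====
theorem validate_port_range_spec : Claim_equal_validate_port_range := by
  intro ports _
  unfold Spec_validate_port_range validate_port_range validate_port_range_alt
  by_cases hlen : ports.length > 65536
  · simp [hlen]
  · rw [if_neg hlen, if_neg hlen]
    have hperm : (PySem.List.sorted ports (fun x => x) false).Perm ports :=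
      PySem.List.sorted_perm ports (fun x => x) false
    have hpw : (PySem.List.sorted ports (fun x => x) false).Pairwise (fun a b => a ≤ b) :=
      PySem.List.sorted_pairwise ports (fun x => x)
    cases hs : PySem.List.sorted ports (fun x => x) false with
    | nil =>
      have : ports = [] := by
        have := hperm; rw [hs] at this; exact (List.Perm.nil_eq this).symm
      subst this
      simp [pvLoopA]
    | cons m t =>
      rw [hs] at hperm hpw
      apply Bool.coe_iff_coe.mp
      rw [pv_loopA_iff]
      dsimp only
      have hhead : ∀ y ∈ ports, m ≤ y := fun y hy =>
        PySem.List.key_head_sorted_le ports (fun x => x) hs y hy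
      have hlast := pv_le_getLast (m :: t) hpw (by simp)
      by_cases hg : m < 1 ∨ (m :: t).getLast (List.cons_ne_nil m t) > 65535
      · rw [if_pos hg]
        refine iff_of_false ?_ (by simp)
        rintro ⟨h1, -, -⟩
        rcases hg with hg | hg
        · have hm : m ∈ ports := hperm.mem_iff.mp (by simp)
          have := h1 m hm; omega
        · have hL : (m :: t).getLast (List.cons_ne_nil m t) ∈ ports :=
            hperm.mem_iff.mp (List.getLast_mem _)
          have := h1 _ hL; omega
      · rw [if_neg hg, pv_zip_all_iff, List.isChain_iff_pairwise]
        push Not at hg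
        constructor
        · rintro ⟨_, hnd, _⟩
          have hnds : (m :: t).Nodup := hperm.symm.nodup hnd
          exact (hpw.and hnds).imp (fun h => lt_of_le_of_ne h.1 h.2)
        · intro hlt
          have hnds : (m :: t).Nodup := hlt.imp ne_of_lt
          refine ⟨?_, hperm.nodup hnds, by simp [PySem.Set.empty]⟩
          intro p hp
          have hps : p ∈ m :: t := hperm.mem_iff.mpr hp
          exact ⟨by have := hhead p hp; omega, by have := hlast p hps; omega⟩
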